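-- pv_equiv track=rewrite | github.com/markymarkus/bedrock-agent-accounts | main.py | filter_dicts
-- ===== SOURCE A (Python) =====
-- def filter_dicts(data, owner=None, environment=None, department=None):
--     # Filter through the list of dictionaries based on optional parameters
--     def matches_criteria(account):
--         tags = account.get('Tags', {})
--         if owner is not None and tags.get('Owner') != owner:
--             return False
--         if environment is not None and tags.get('Environment') != environment:
--             return False
--         if department is not None and tags.get('Department') != department:
--             return False
--         return True
--
--     # Return a list of dictionaries that match the criteria
--     return [account for account in data if matches_criteria(account)]
-- ===== SOURCE B (Python) =====
-- def filter_dicts(data, owner=None, environment=None, department=None):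
--     # Staged narrowing: apply each requested criterion as its own filtering
--     # pass over the shrinking candidate list, instead of one pass with a
--     # combined predicate. Correct because the criteria are independent
--     # conjuncts, so successive filters compose to the same result.
--     result = data
--     for key, value in (('Owner', owner), ('Environment', environment), ('Department', department)):
--         if value is not None:
--             result = [a for a in result if a.get('Tags', {}).get(key) == value]
--     return result
-- ===== Notes on version B (the rewrite author's own statement) =====
-- stated objective: alternative
-- what changed: Replaces A's single pass with a three-branch per-element predicate by staged narrowing: each non-None criterion is applied as its own filtering pass over the shrinking candidate list; equivalent because the conjunctive filters compose.
import Mathlib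
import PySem

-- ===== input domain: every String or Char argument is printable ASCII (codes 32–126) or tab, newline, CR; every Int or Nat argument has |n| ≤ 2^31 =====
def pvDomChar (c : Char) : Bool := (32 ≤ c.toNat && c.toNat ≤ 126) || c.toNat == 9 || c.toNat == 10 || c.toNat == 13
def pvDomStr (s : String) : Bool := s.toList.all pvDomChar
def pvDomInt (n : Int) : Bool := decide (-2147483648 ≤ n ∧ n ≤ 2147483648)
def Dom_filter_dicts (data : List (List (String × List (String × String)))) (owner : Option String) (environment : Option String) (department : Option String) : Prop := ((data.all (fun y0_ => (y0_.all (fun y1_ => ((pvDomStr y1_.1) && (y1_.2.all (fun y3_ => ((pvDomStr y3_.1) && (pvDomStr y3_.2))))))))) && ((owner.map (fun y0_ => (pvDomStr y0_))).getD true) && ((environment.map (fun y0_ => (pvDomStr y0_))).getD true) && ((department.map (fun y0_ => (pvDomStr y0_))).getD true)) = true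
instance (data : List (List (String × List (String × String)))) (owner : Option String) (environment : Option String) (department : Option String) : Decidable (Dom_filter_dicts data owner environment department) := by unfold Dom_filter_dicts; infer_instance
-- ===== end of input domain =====

-- B replaces A's single pass with a combined three-branch predicate by staged
-- narrowing: one filtering pass per non-None criterion (objective: alternative).

-- dict.get k (first match in the association list; = Python dict .get)
def pvAget (d : List (String × String)) (k : String) : Option String :=
  (d.find? (fun p => p.1 == k)).map (·.2)

-- account.get('Tags', {})
def pvTags (account : List (String × List (String × String))) : List (String × String) :=
  ((account.find? (fun p => p.1 == "Tags")).map (·.2)).getD []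

-- ===== PORT A =====
def pvMatchesCriteria (owner environment department : Option String)
    (account : List (String × List (String × String))) : Bool :=
  let tags := pvTags account
  if owner.isSome && (pvAget tags "Owner" != owner) then false
  else if environment.isSome && (pvAget tags "Environment" != environment) then false
  else if department.isSome && (pvAget tags "Department" != department) then false
  else true

def filter_dicts (data : List (List (String × List (String × String)))) (owner : Option String) (environment : Option String) (department : Option String) : List (List (String × List (String × String))) :=
  data.filter (pvMatchesCriteria owner environment department)

-- ===== PORT B =====
-- one staged pass: narrow `result` by key/value if value is not None
def pvPass (result : List (List (String × List (String × String))))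
    (kv : String × Option String) : List (List (String × List (String × String))) :=
  match kv.2 with
  | none => result
  | some v => result.filter (fun a => pvAget (pvTags a) kv.1 == some v)

def filter_dicts_alt (data : List (List (String × List (String × String)))) (owner : Option String) (environment : Option String) (department : Option String) : List (List (String × List (String × String))) :=
  [("Owner", owner), ("Environment", environment), ("Department", department)].foldl pvPass data

-- ===== PRECONDITION & SPEC =====
def Spec_filter_dicts (data : List (List (String × List (String × String)))) (owner : Option String) (environment : Option String) (department : Option String) (out : List (List (String × List (String × String)))) : Prop := out = filter_dicts_alt data owner environment department
instance (data : List (List (String × List (String × String)))) (owner : Option String) (environment : Option String) (department : Option String) (out : List (List (String × List (String × String)))) : Decidable (Spec_filter_dicts data owner environment department out) := by unfold Spec_filter_dicts; infer_instance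

-- ===== CLAIM (what is proved, stated in full; the proofs are below) =====
def Claim_equal_filter_dicts : Prop := ∀ (data : List (List (String × List (String × String)))) (owner : Option String) (environment : Option String) (department : Option String), Dom_filter_dicts data owner environment department → Spec_filter_dicts data owner environment department (filter_dicts data owner environment department)

-- ===== LEMMAS AND PROOFS =====
theorem dec_beq (x y : Option String) : decide (x = y) = (x == y) := by
  cases h : x == y
  · simp_all
  · simp_all

theorem pred_eq (owner environment department : Option String)
    (account : List (String × List (String × String))) :
    pvMatchesCriteria owner environment department account =
      ((match owner with
        | none => true
        | some v => pvAget (pvTags account) "Owner" == some v) &&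
       (match environment with
        | none => true
        | some v => pvAget (pvTags account) "Environment" == some v) &&
       (match department with
        | none => true
        | some v => pvAget (pvTags account) "Department" == some v)) := by
  cases owner <;> cases environment <;> cases department <;>
    simp [pvMatchesCriteria, dec_beq, Bool.and_assoc]

-- ===== VERDICT (by name: the statement is the Claim_ definition above) =====
theorem filter_dicts_spec : Claim_equal_filter_dicts := by
  intro data owner environment department _
  unfold Spec_filter_dicts filter_dicts filter_dicts_alt
  simp only [List.foldl_cons, List.foldl_nil, pvPass]
  cases owner <;> cases environment <;> cases department <;>
    simp only [List.filter_filter] <;>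
    first
      | exact (List.filter_congr (fun a _ => by simp [pred_eq])).trans (List.filter_true _)
      | exact List.filter_congr (fun a _ => by
          simp [pred_eq, Bool.and_comm, Bool.and_assoc])
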